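-- pv_equiv track=rewrite | github.com/mateuszpolis/WinCC-Code-Extractor | src/xml_parser.py | unescape_xml_content
-- ===== SOURCE A (Python) =====
-- def unescape_xml_content(content: str) -> str:
--     """
--     Unescape XML content by replacing XML entities with actual characters.
--
--     Args:
--         content: The XML content to unescape.
--
--     Returns:
--         The unescaped content with XML entities replaced.
--     """
--     replacements = {
--         "&quot;": '"',
--         "&apos;": "'",
--         "&lt;": "<",
--         "&gt;": ">",
--         "&amp;": "&",
--     }
--
--     for entity, char in replacements.items():
--         content = content.replace(entity, char)
--     return content
-- ===== SOURCE B (Python) =====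
-- def unescape_xml_content(content: str) -> str:
--     """Single left-to-right scan decoding the five XML entities."""
--     table = {
--         "&quot;": '"',
--         "&apos;": "'",
--         "&lt;": "<",
--         "&gt;": ">",
--         "&amp;": "&",
--     }
--     out = []
--     i = 0
--     n = len(content)
--     while i < n:
--         if content[i] == "&":
--             for ent, ch in table.items():
--                 if content.startswith(ent, i):
--                     out.append(ch)
--                     i += len(ent)
--                     break
--             else:
--                 out.append("&")
--                 i += 1
--         else:
--             out.append(content[i])
--             i += 1
--     return "".join(out)
-- ===== Notes on version B (the rewrite author's own statement) =====
-- stated objective: alternative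
-- what changed: Replaces five sequential full-string str.replace passes by one hand-written left-to-right scan that decodes an entity (or copies the char) at each position; correct because no replacement character can create or destroy a later entity match.
import Mathlib
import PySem

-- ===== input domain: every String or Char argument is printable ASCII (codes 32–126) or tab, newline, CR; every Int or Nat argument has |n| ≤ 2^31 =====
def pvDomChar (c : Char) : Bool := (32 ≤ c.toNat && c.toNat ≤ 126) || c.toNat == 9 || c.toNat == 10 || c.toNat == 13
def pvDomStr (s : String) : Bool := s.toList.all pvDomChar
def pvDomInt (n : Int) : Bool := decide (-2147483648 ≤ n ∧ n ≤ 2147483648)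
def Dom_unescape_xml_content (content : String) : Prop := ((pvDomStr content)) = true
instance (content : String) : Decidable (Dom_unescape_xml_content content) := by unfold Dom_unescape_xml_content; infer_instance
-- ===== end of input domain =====

-- B replaces A's five sequential full-string replace passes by one left-to-right scan
-- that decodes an entity (or copies the character) at each position (objective: alternative single-pass algorithm).

-- ===== PORT A =====
def unescape_xml_content (content : String) : String :=
  let replacements : PySem.Dict String String :=
    PySem.Dict.ofList
      [("&quot;", "\""), ("&apos;", "'"), ("&lt;", "<"), ("&gt;", ">"), ("&amp;", "&")]
  replacements.items.foldl (fun content ec => PySem.Str.replace content ec.1 ec.2) content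

-- ===== PORT B =====
-- one scan over the characters; on '&' try the five entities in table order, else copy the char
def pvScan (cs : List Char) : List Char :=
  match cs with
  | [] => []
  | c :: rest =>
    if c = '&' then
      if ['q','u','o','t',';'].isPrefixOf rest then '"' :: pvScan (rest.drop 5)
      else if ['a','p','o','s',';'].isPrefixOf rest then '\'' :: pvScan (rest.drop 5)
      else if ['l','t',';'].isPrefixOf rest then '<' :: pvScan (rest.drop 3)
      else if ['g','t',';'].isPrefixOf rest then '>' :: pvScan (rest.drop 3)
      else if ['a','m','p',';'].isPrefixOf rest then '&' :: pvScan (rest.drop 4)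
      else '&' :: pvScan rest
    else c :: pvScan rest
termination_by cs.length
decreasing_by all_goals simp [List.length_drop]

def unescape_xml_content_alt (content : String) : String :=
  String.ofList (pvScan content.toList)

-- ===== PRECONDITION & SPEC =====
def Spec_unescape_xml_content (content : String) (out : String) : Prop := out = unescape_xml_content_alt content
instance (content : String) (out : String) : Decidable (Spec_unescape_xml_content content out) := by unfold Spec_unescape_xml_content; infer_instance

-- ===== CLAIM (what is proved, stated in full; the proofs are below) =====
def Claim_equal_unescape_xml_content : Prop := ∀ (content : String), Dom_unescape_xml_content content → Spec_unescape_xml_content content (unescape_xml_content content)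

-- ===== LEMMAS AND PROOFS =====

-- a simple structural version of PySem.Chars.replace (no fuel, no accumulator)
def repl (old new : List Char) : List Char → List Char
  | [] => []
  | c :: t =>
    if old.isPrefixOf (c :: t) then new ++ repl old new (t.drop (old.length - 1))
    else c :: repl old new t
termination_by l => l.length
decreasing_by all_goals simp [List.length_drop]

lemma go_eq_repl (old new : List Char) (hold : old ≠ []) :
    ∀ (fuel : Nat) (l acc : List Char), l.length ≤ fuel →
      PySem.Chars.replace.go old new fuel l acc = acc.reverse ++ repl old new l := by
  intro fuel
  induction fuel with
  | zero =>
    intro l acc hl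
    have : l = [] := by cases l <;> simp_all
    subst this
    rw [PySem.Chars.replace.go.eq_def]
    simp [repl]
  | succ n ih =>
    intro l acc hl
    cases l with
    | nil => rw [PySem.Chars.replace.go.eq_def]; simp [repl]
    | cons c t =>
      rw [PySem.Chars.replace.go.eq_def]
      simp only []
      by_cases hp : old.isPrefixOf (c :: t) = true
      · simp only [hp, if_true]
        have hol : 1 ≤ old.length := by cases old <;> simp_all
        obtain ⟨o, ho⟩ : ∃ o, old.length = o + 1 := ⟨old.length - 1, by omega⟩
        have hdrop : List.drop old.length (c :: t) = t.drop (old.length - 1) := by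
          rw [ho, List.drop_succ_cons]; simp
        have hlen : (List.drop old.length (c :: t)).length ≤ n := by
          simp only [List.length_drop, List.length_cons] at *
          omega
        rw [ih _ _ hlen, hdrop]
        rw [repl]
        simp [hp]
      · simp only [hp]
        have hlen : t.length ≤ n := by simp at hl; omega
        rw [ih _ _ hlen]
        rw [repl]
        simp [hp]

lemma replace_eq_repl (s old new : List Char) (hold : old ≠ []) :
    PySem.Chars.replace s old new = repl old new s := by
  rw [PySem.Chars.replace]
  have : old.isEmpty = false := by cases old <;> simp_all
  rw [this]
  simpa using go_eq_repl old new hold s.length s [] (le_refl _)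

-- a single-char replacement never creates a prefix occurrence of a word not containing it
lemma prefix_back (old : List Char) (r : Char) :
    ∀ (n : Nat) (t w : List Char), r ∉ w → t.length ≤ n →
      w.isPrefixOf (repl old [r] t) = true → w.isPrefixOf t = true := by
  intro n
  induction n with
  | zero =>
    intro t w hr ht h
    have : t = [] := by cases t <;> simp_all
    subst this
    simpa [repl] using h
  | succ n ih =>
    intro t w hr ht h
    cases t with
    | nil => simpa [repl] using h
    | cons c t' =>
      rw [repl] at h
      by_cases hp : old.isPrefixOf (c :: t') = true
      · simp only [hp, if_true] at h
        cases w with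
        | nil => simp [List.isPrefixOf]
        | cons x w' =>
          simp only [List.cons_append, List.nil_append, List.isPrefixOf] at h
          have hx : (x == r) = true := ((Bool.and_eq_true _ _).mp h).1
          have : x = r := by simpa using hx
          exact absurd (this ▸ List.mem_cons_self) hr
      · simp only [hp] at h
        cases w with
        | nil => simp [List.isPrefixOf]
        | cons x w' =>
          simp only [List.isPrefixOf] at h ⊢
          obtain ⟨hx, hw'⟩ := (Bool.and_eq_true _ _).mp h
          have hlen : t'.length ≤ n := by simp at ht; omega
          have hr' : r ∉ w' := fun hm => hr (List.mem_cons_of_mem _ hm)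
          exact (Bool.and_eq_true _ _).mpr ⟨hx, ih t' w' hr' hlen hw'⟩

-- abbreviations for the five passes of A
def R1 (l : List Char) : List Char := repl ['&','q','u','o','t',';'] ['"'] l
def R2 (l : List Char) : List Char := repl ['&','a','p','o','s',';'] ['\''] l
def R3 (l : List Char) : List Char := repl ['&','l','t',';'] ['<'] l
def R4 (l : List Char) : List Char := repl ['&','g','t',';'] ['>'] l
def R5 (l : List Char) : List Char := repl ['&','a','m','p',';'] ['&'] l

def full (l : List Char) : List Char := R5 (R4 (R3 (R2 (R1 l))))

lemma repl_pass_head (a : Char) (w new : List Char) (c : Char) (X : List Char) (h : c ≠ a) :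
    repl (a :: w) new (c :: X) = c :: repl (a :: w) new X := by
  rw [repl]
  have : (a :: w).isPrefixOf (c :: X) = false := by
    simp [List.isPrefixOf]
    intro he
    exact absurd he.symm h
  simp [this]

lemma repl_pass_tail (a : Char) (w new : List Char) (c : Char) (X : List Char)
    (h : w.isPrefixOf X = false) :
    repl (a :: w) new (c :: X) = c :: repl (a :: w) new X := by
  rw [repl]
  simp [List.isPrefixOf, h]

lemma pb (old : List Char) (r : Char) (X w : List Char) (hr : r ∉ w)
    (h : w.isPrefixOf X = false) : w.isPrefixOf (repl old [r] X) = false := by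
  cases hb : w.isPrefixOf (repl old [r] X) with
  | false => rfl
  | true => exact absurd (prefix_back old r X.length X w hr le_rfl hb) (by simp [h])

lemma R1_pass (c : Char) (X : List Char) (h : c ≠ '&') : R1 (c :: X) = c :: R1 X :=
  repl_pass_head _ _ _ _ _ h
lemma R2_pass (c : Char) (X : List Char) (h : c ≠ '&') : R2 (c :: X) = c :: R2 X :=
  repl_pass_head _ _ _ _ _ h
lemma R3_pass (c : Char) (X : List Char) (h : c ≠ '&') : R3 (c :: X) = c :: R3 X :=
  repl_pass_head _ _ _ _ _ h
lemma R4_pass (c : Char) (X : List Char) (h : c ≠ '&') : R4 (c :: X) = c :: R4 X :=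
  repl_pass_head _ _ _ _ _ h
lemma R5_pass (c : Char) (X : List Char) (h : c ≠ '&') : R5 (c :: X) = c :: R5 X :=
  repl_pass_head _ _ _ _ _ h

lemma full_eq_scan : ∀ (n : Nat) (l : List Char), l.length ≤ n → full l = pvScan l := by
  intro n
  induction n with
  | zero =>
    intro l hl
    have : l = [] := by cases l <;> simp_all
    subst this
    simp [full, R1, R2, R3, R4, R5, repl, pvScan]
  | succ n ih =>
    intro l hl
    cases l with
    | nil => simp [full, R1, R2, R3, R4, R5, repl, pvScan]
    | cons c rest =>
      by_cases hc : c = '&'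
      · subst hc
        by_cases h1 : (['q','u','o','t',';'].isPrefixOf rest) = true
        · obtain ⟨t, rfl⟩ := List.isPrefixOf_iff_prefix.mp h1
          have e1 : R1 ('&' :: (['q','u','o','t',';'] ++ t)) = '"' :: R1 t := by
            simp [R1, repl]
          have hlen : t.length ≤ n := by simp at hl; omega
          have : full ('&' :: (['q','u','o','t',';'] ++ t)) = '"' :: full t := by
            simp only [full, e1, R2_pass '"' _ (by decide), R3_pass '"' _ (by decide),
              R4_pass '"' _ (by decide), R5_pass '"' _ (by decide)]
          rw [this, ih t hlen]
          simp [pvScan, List.isPrefixOf]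
        · by_cases h2 : (['a','p','o','s',';'].isPrefixOf rest) = true
          · obtain ⟨t, rfl⟩ := List.isPrefixOf_iff_prefix.mp h2
            have e1 : R1 ('&' :: (['a','p','o','s',';'] ++ t)) =
                '&' :: 'a' :: 'p' :: 'o' :: 's' :: ';' :: R1 t := by simp [R1, repl]
            have e2 : R2 ('&' :: 'a' :: 'p' :: 'o' :: 's' :: ';' :: R1 t) =
                '\'' :: R2 (R1 t) := by simp [R2, repl]
            have hlen : t.length ≤ n := by simp at hl; omega
            have : full ('&' :: (['a','p','o','s',';'] ++ t)) = '\'' :: full t := by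
              simp only [full, e1, e2, R3_pass '\'' _ (by decide), R4_pass '\'' _ (by decide),
                R5_pass '\'' _ (by decide)]
            rw [this, ih t hlen]
            simp [pvScan, List.isPrefixOf]
          · by_cases h3 : (['l','t',';'].isPrefixOf rest) = true
            · obtain ⟨t, rfl⟩ := List.isPrefixOf_iff_prefix.mp h3
              have e1 : R1 ('&' :: (['l','t',';'] ++ t)) = '&' :: 'l' :: 't' :: ';' :: R1 t := by
                simp [R1, repl]
              have e2 : R2 ('&' :: 'l' :: 't' :: ';' :: R1 t) =
                  '&' :: 'l' :: 't' :: ';' :: R2 (R1 t) := by simp [R2, repl]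
              have e3 : R3 ('&' :: 'l' :: 't' :: ';' :: R2 (R1 t)) = '<' :: R3 (R2 (R1 t)) := by
                simp [R3, repl]
              have hlen : t.length ≤ n := by simp at hl; omega
              have : full ('&' :: (['l','t',';'] ++ t)) = '<' :: full t := by
                simp only [full, e1, e2, e3, R4_pass '<' _ (by decide), R5_pass '<' _ (by decide)]
              rw [this, ih t hlen]
              simp [pvScan, List.isPrefixOf]
            · by_cases h4 : (['g','t',';'].isPrefixOf rest) = true
              · obtain ⟨t, rfl⟩ := List.isPrefixOf_iff_prefix.mp h4
                have e1 : R1 ('&' :: (['g','t',';'] ++ t)) = '&' :: 'g' :: 't' :: ';' :: R1 t := by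
                  simp [R1, repl]
                have e2 : R2 ('&' :: 'g' :: 't' :: ';' :: R1 t) =
                    '&' :: 'g' :: 't' :: ';' :: R2 (R1 t) := by simp [R2, repl]
                have e3 : R3 ('&' :: 'g' :: 't' :: ';' :: R2 (R1 t)) =
                    '&' :: 'g' :: 't' :: ';' :: R3 (R2 (R1 t)) := by simp [R3, repl]
                have e4 : R4 ('&' :: 'g' :: 't' :: ';' :: R3 (R2 (R1 t))) =
                    '>' :: R4 (R3 (R2 (R1 t))) := by simp [R4, repl]
                have hlen : t.length ≤ n := by simp at hl; omega
                have : full ('&' :: (['g','t',';'] ++ t)) = '>' :: full t := by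
                  simp only [full, e1, e2, e3, e4, R5_pass '>' _ (by decide)]
                rw [this, ih t hlen]
                simp [pvScan, List.isPrefixOf]
              · by_cases h5 : (['a','m','p',';'].isPrefixOf rest) = true
                · obtain ⟨t, rfl⟩ := List.isPrefixOf_iff_prefix.mp h5
                  have e1 : R1 ('&' :: (['a','m','p',';'] ++ t)) =
                      '&' :: 'a' :: 'm' :: 'p' :: ';' :: R1 t := by simp [R1, repl]
                  have e2 : R2 ('&' :: 'a' :: 'm' :: 'p' :: ';' :: R1 t) =
                      '&' :: 'a' :: 'm' :: 'p' :: ';' :: R2 (R1 t) := by simp [R2, repl]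
                  have e3 : R3 ('&' :: 'a' :: 'm' :: 'p' :: ';' :: R2 (R1 t)) =
                      '&' :: 'a' :: 'm' :: 'p' :: ';' :: R3 (R2 (R1 t)) := by simp [R3, repl]
                  have e4 : R4 ('&' :: 'a' :: 'm' :: 'p' :: ';' :: R3 (R2 (R1 t))) =
                      '&' :: 'a' :: 'm' :: 'p' :: ';' :: R4 (R3 (R2 (R1 t))) := by
                    simp [R4, repl]
                  have e5 : R5 ('&' :: 'a' :: 'm' :: 'p' :: ';' :: R4 (R3 (R2 (R1 t)))) =
                      '&' :: R5 (R4 (R3 (R2 (R1 t)))) := by simp [R5, repl]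
                  have hlen : t.length ≤ n := by simp at hl; omega
                  have : full ('&' :: (['a','m','p',';'] ++ t)) = '&' :: full t := by
                    simp only [full, e1, e2, e3, e4, e5]
                  rw [this, ih t hlen]
                  simp [pvScan, List.isPrefixOf]
                · -- no entity matches at this '&'
                  have h1' := Bool.not_eq_true _ |>.mp h1
                  have h2' := Bool.not_eq_true _ |>.mp h2
                  have h3' := Bool.not_eq_true _ |>.mp h3
                  have h4' := Bool.not_eq_true _ |>.mp h4
                  have h5' := Bool.not_eq_true _ |>.mp h5
                  have e1 : R1 ('&' :: rest) = '&' :: R1 rest :=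
                    repl_pass_tail _ _ _ _ _ h1'
                  have f2 : (['a','p','o','s',';'].isPrefixOf (R1 rest)) = false :=
                    pb _ '"' _ _ (by decide) h2'
                  have f3 : (['l','t',';'].isPrefixOf (R2 (R1 rest))) = false :=
                    pb _ '\'' _ _ (by decide) (pb _ '"' _ _ (by decide) h3')
                  have f4 : (['g','t',';'].isPrefixOf (R3 (R2 (R1 rest)))) = false :=
                    pb _ '<' _ _ (by decide)
                      (pb _ '\'' _ _ (by decide) (pb _ '"' _ _ (by decide) h4'))
                  have f5 : (['a','m','p',';'].isPrefixOf (R4 (R3 (R2 (R1 rest))))) = false :=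
                    pb _ '>' _ _ (by decide) (pb _ '<' _ _ (by decide)
                      (pb _ '\'' _ _ (by decide) (pb _ '"' _ _ (by decide) h5')))
                  have e2 : R2 ('&' :: R1 rest) = '&' :: R2 (R1 rest) :=
                    repl_pass_tail _ _ _ _ _ f2
                  have e3 : R3 ('&' :: R2 (R1 rest)) = '&' :: R3 (R2 (R1 rest)) :=
                    repl_pass_tail _ _ _ _ _ f3
                  have e4 : R4 ('&' :: R3 (R2 (R1 rest))) = '&' :: R4 (R3 (R2 (R1 rest))) :=
                    repl_pass_tail _ _ _ _ _ f4
                  have e5 : R5 ('&' :: R4 (R3 (R2 (R1 rest)))) = '&' :: R5 (R4 (R3 (R2 (R1 rest)))) :=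
                    repl_pass_tail _ _ _ _ _ f5
                  have hlen : rest.length ≤ n := by simp at hl; omega
                  have : full ('&' :: rest) = '&' :: full rest := by
                    simp only [full, e1, e2, e3, e4, e5]
                  rw [this, ih rest hlen]
                  simp [pvScan, h1', h2', h3', h4', h5']
      · have hlen : rest.length ≤ n := by simp at hl; omega
        have : full (c :: rest) = c :: full rest := by
          simp only [full, R1_pass _ _ hc, R2_pass _ _ hc, R3_pass _ _ hc,
            R4_pass _ _ hc, R5_pass _ _ hc]
        rw [this, ih rest hlen]
        simp [pvScan, hc]

-- ===== VERDICT (by name: the statement is the Claim_ definition above) =====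
theorem unescape_xml_content_spec : Claim_equal_unescape_xml_content := by
  intro content _
  unfold Spec_unescape_xml_content
  apply String.toList_injective
  have hitems : (PySem.Dict.ofList
      [("&quot;", "\""), ("&apos;", "'"), ("&lt;", "<"), ("&gt;", ">"), ("&amp;", "&")]).items =
      [("&quot;", "\""), ("&apos;", "'"), ("&lt;", "<"), ("&gt;", ">"), ("&amp;", "&")] := by
    decide
  rw [unescape_xml_content]
  rw [hitems]
  simp only [List.foldl]
  rw [unescape_xml_content_alt, String.toList_ofList]
  simp only [PySem.Str.toList_replace]
  rw [replace_eq_repl _ _ _ (by decide), replace_eq_repl _ _ _ (by decide),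
    replace_eq_repl _ _ _ (by decide), replace_eq_repl _ _ _ (by decide),
    replace_eq_repl _ _ _ (by decide)]
  exact full_eq_scan content.toList.length content.toList le_rfl
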